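-- pv_equiv track=rewrite | github.com/giaxyz/ChiSquaredContingencies | DoChiSquare.py | getTotalsOutputRow
-- ===== SOURCE A (Python) =====
-- def getTotalsOutputRow(chiMatrix):
--
--     """
--     Work out the contingency table row totals (output row totals)
--     Input : the contingency table chiMatrix
--     Return : list of totals for each output
--
--     """
--
--     outputTotals = []
--     lengthRow = len(chiMatrix)
--     lengthColumn = len(chiMatrix[0])
--
--     for i in range(0, lengthColumn):
--
--         currentTotal = 0
--
--         for j in range (0,lengthRow):
--             currentRow = chiMatrix[j]
--             currentTotal = currentTotal + currentRow[i]
--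
--         outputTotals.append(currentTotal)
--
--     return outputTotals
-- ===== SOURCE B (Python) =====
-- def getTotalsOutputRow(chiMatrix):
--     """
--     Work out the contingency table row totals (output row totals)
--     by a single row-major sweep maintaining a vector of running totals.
--     """
--     lengthColumn = len(chiMatrix[0])
--     outputTotals = [0] * lengthColumn
--     for currentRow in chiMatrix:
--         outputTotals = [outputTotals[i] + currentRow[i] for i in range(lengthColumn)]
--     return outputTotals
-- ===== Notes on version B (the rewrite author's own statement) =====
-- stated objective: alternative
-- what changed: A completes one column total at a time with column-major nested index loops; B makes a single row-major sweep over the rows, maintaining a whole vector of running column totals that it rebuilds per row.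
import Mathlib
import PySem

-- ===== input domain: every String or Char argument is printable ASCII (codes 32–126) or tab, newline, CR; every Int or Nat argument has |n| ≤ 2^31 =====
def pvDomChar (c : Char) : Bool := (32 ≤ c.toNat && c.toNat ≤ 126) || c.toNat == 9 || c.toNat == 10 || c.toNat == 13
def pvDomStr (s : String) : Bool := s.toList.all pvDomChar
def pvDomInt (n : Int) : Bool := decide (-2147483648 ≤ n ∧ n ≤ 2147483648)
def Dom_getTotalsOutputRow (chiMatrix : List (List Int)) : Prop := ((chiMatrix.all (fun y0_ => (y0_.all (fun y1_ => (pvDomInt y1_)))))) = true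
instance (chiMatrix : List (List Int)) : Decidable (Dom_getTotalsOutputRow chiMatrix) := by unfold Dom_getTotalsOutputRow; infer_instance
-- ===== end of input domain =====

-- B replaces A's column-major nested index loops by one row-major sweep that rebuilds a full
-- vector of running column totals per row (objective: alternative decomposition, same cost).


-- ===== PORT A =====
def getTotalsOutputRow (chiMatrix : List (List Int)) : List Int :=
  let lengthRow : Int := chiMatrix.length
  let lengthColumn : Int := (PySem.List.pyGetD chiMatrix 0 []).length
  (PySem.List.pyRange 0 lengthColumn 1).foldl
    (fun outputTotals i =>
      outputTotals ++
        [(PySem.List.pyRange 0 lengthRow 1).foldl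
          (fun currentTotal j =>
            currentTotal + PySem.List.pyGetD (PySem.List.pyGetD chiMatrix j []) i 0) 0])
    []

-- ===== PORT B =====
def getTotalsOutputRow_alt (chiMatrix : List (List Int)) : List Int :=
  let lengthColumn : Int := (PySem.List.pyGetD chiMatrix 0 []).length
  chiMatrix.foldl
    (fun outputTotals currentRow =>
      (PySem.List.pyRange 0 lengthColumn 1).map
        (fun i => PySem.List.pyGetD outputTotals i 0 + PySem.List.pyGetD currentRow i 0))
    (List.replicate lengthColumn.toNat 0)

-- ===== PRECONDITION & SPEC =====
-- Pre_ excludes exactly the inputs on which the Python A raises IndexError: the empty matrix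
-- (chiMatrix[0]) and ragged matrices with a row shorter than row 0 (currentRow[i]).
def Pre_getTotalsOutputRow (chiMatrix : List (List Int)) : Prop :=
  chiMatrix ≠ [] ∧ ∀ row ∈ chiMatrix, (PySem.List.pyGetD chiMatrix 0 []).length ≤ row.length
instance (chiMatrix : List (List Int)) : Decidable (Pre_getTotalsOutputRow chiMatrix) := by
  unfold Pre_getTotalsOutputRow; infer_instance
def pvWitness_getTotalsOutputRow : List (List Int) := [[1, 2], [3, 4], [5, 6]]
def Spec_getTotalsOutputRow (chiMatrix : List (List Int)) (out : List Int) : Prop := out = getTotalsOutputRow_alt chiMatrix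
instance (chiMatrix : List (List Int)) (out : List Int) : Decidable (Spec_getTotalsOutputRow chiMatrix out) := by unfold Spec_getTotalsOutputRow; infer_instance

-- ===== CLAIM (what is proved, stated in full; the proofs are below) =====
def Claim_equal_getTotalsOutputRow : Prop := ∀ (chiMatrix : List (List Int)), Dom_getTotalsOutputRow chiMatrix → Pre_getTotalsOutputRow chiMatrix → Spec_getTotalsOutputRow chiMatrix (getTotalsOutputRow chiMatrix)

-- ===== LEMMAS AND PROOFS =====

-- one row-major step of B, on an accumulator in canonical map-over-range form
theorem pv_col_step (g : Nat → Int) (row : List Int) (N : Nat) :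
    (PySem.List.pyRange 0 (N : Int) 1).map
        (fun i => PySem.List.pyGetD ((List.range N).map g) i 0 + PySem.List.pyGetD row i 0)
      = (List.range N).map (fun k => g k + PySem.List.pyGetD row (k : Int) 0) := by
  rw [PySem.List.pyRange_zero_nat, List.map_map]
  refine List.map_congr_left (fun k hk => ?_)
  have hkN : k < N := List.mem_range.mp hk
  simp [PySem.List.pyGetD_natCast, List.getD, List.getElem?_range hkN]

-- B's outer fold in canonical form
theorem pv_outer (N : Nat) (rows : List (List Int)) : ∀ g : Nat → Int,
    rows.foldl
        (fun ts row =>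
          (PySem.List.pyRange 0 (N : Int) 1).map
            (fun i => PySem.List.pyGetD ts i 0 + PySem.List.pyGetD row i 0))
        ((List.range N).map g)
      = (List.range N).map
          (fun k => g k + (rows.map (fun r => PySem.List.pyGetD r (k : Int) 0)).sum) := by
  induction rows with
  | nil => intro g; simp
  | cons r rs ih =>
      intro g
      rw [List.foldl_cons, pv_col_step g r N,
        ih (fun k => g k + PySem.List.pyGetD r (k : Int) 0)]
      refine List.map_congr_left (fun k _ => ?_)
      simp [add_assoc]

theorem pv_A_canon (m : List (List Int)) :
    getTotalsOutputRow m
      = (List.range (PySem.List.pyGetD m 0 []).length).map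
          (fun (k : Nat) => (m.map (fun r => PySem.List.pyGetD r (k : Int) 0)).sum) := by
  unfold getTotalsOutputRow
  rw [PySem.List.foldl_append_singleton_eq_map, List.nil_append]
  have h1 : ∀ i : Int,
      List.foldl (fun t j => t + PySem.List.pyGetD (PySem.List.pyGetD m j []) i 0) 0
          (PySem.List.pyRange 0 (m.length : Int))
        = (m.map (fun r => PySem.List.pyGetD r i 0)).sum := by
    intro i
    rw [PySem.List.foldl_pyRange_zero_pyGetD' m []
        (fun t r => t + PySem.List.pyGetD r i 0) 0,
      PySem.List.foldl_add, zero_add]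
  simp only [h1]
  rw [PySem.List.pyRange_zero_nat, List.map_map]
  rfl

theorem pv_B_canon (m : List (List Int)) :
    getTotalsOutputRow_alt m
      = (List.range (PySem.List.pyGetD m 0 []).length).map
          (fun (k : Nat) => (m.map (fun r => PySem.List.pyGetD r (k : Int) 0)).sum) := by
  unfold getTotalsOutputRow_alt
  simp only [Int.toNat_natCast]
  have hrep : List.replicate ((((PySem.List.pyGetD m 0 []).length : Int)).toNat) (0 : Int)
      = (List.range (PySem.List.pyGetD m 0 []).length).map (fun _ => 0) := by
    simp [List.map_const']
  rw [Int.toNat_natCast] at hrep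
  rw [hrep, pv_outer (PySem.List.pyGetD m 0 []).length m (fun _ => 0)]
  simp

-- ===== VERDICT (by name: the statement is the Claim_ definition above) =====
theorem getTotalsOutputRow_spec : Claim_equal_getTotalsOutputRow := by
  intro m _ _
  unfold Spec_getTotalsOutputRow
  rw [pv_A_canon, pv_B_canon]
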